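-- pv_equiv track=rewrite | github.com/SashaZt/my_projects_in_python | klarstein_pl/client/main_xml.py | replace_description_placeholders
-- ===== SOURCE A (Python) =====
-- def replace_description_placeholders(xml_str, offers_data):
--     """
--     Заменяет плейсхолдеры описаний на CDATA содержимое
--     ИСПРАВЛЕНО: Поддержка обоих языков
--     """
--     for offer_data in offers_data:
--         # Получаем описания для обоих языков
--         description_ru = offer_data.get("description", "")
--         description_ua = offer_data.get("description_ua", "")
--
--         # Заменяем placeholder для русского описания
--         xml_str = xml_str.replace(
--             "<description>DESCRIPTION_PLACEHOLDER_RU</description>",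
--             f"<description><![CDATA[{description_ru}]]></description>",
--             1,  # Заменяем только первое вхождение
--         )
--
--         # Заменяем placeholder для украинского описания
--         xml_str = xml_str.replace(
--             "<description_ua>DESCRIPTION_PLACEHOLDER_UA</description_ua>",
--             f"<description_ua><![CDATA[{description_ua}]]></description_ua>",
--             1,  # Заменяем только первое вхождение
--         )
--
--     return xml_str
-- ===== SOURCE B (Python) =====
-- def replace_description_placeholders(xml_str, offers_data):
--     # One left-to-right pass: repeatedly jump (str.find) to the nearest remaining
--     # placeholder; the k-th RU / UA placeholder gets the k-th offer's description.
--     RU = "<description>DESCRIPTION_PLACEHOLDER_RU</description>"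
--     UA = "<description_ua>DESCRIPTION_PLACEHOLDER_UA</description_ua>"
--     rus = [o.get("description", "") for o in offers_data]
--     uas = [o.get("description_ua", "") for o in offers_data]
--     out = []
--     pos, ri, ui = 0, 0, 0
--     while True:
--         i = xml_str.find(RU, pos) if ri < len(rus) else -1
--         j = xml_str.find(UA, pos) if ui < len(uas) else -1
--         if i == -1 and j == -1:
--             out.append(xml_str[pos:])
--             return "".join(out)
--         if i != -1 and (j == -1 or i < j):
--             out.append(xml_str[pos:i])
--             out.append("<description><![CDATA[" + rus[ri] + "]]></description>")
--             ri += 1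
--             pos = i + len(RU)
--         else:
--             out.append(xml_str[pos:j])
--             out.append("<description_ua><![CDATA[" + uas[ui] + "]]></description_ua>")
--             ui += 1
--             pos = j + len(UA)
-- ===== Notes on version B (the rewrite author's own statement) =====
-- stated objective: faster
-- what changed: A rescans the whole (growing) XML string from position 0 twice per offer via str.replace(..., 1); B makes one left-to-right scan of the XML, consuming the RU and UA descriptions from two in-order lists so the k-th placeholder of each kind gets the k-th offer's description.
import Mathlib
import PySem

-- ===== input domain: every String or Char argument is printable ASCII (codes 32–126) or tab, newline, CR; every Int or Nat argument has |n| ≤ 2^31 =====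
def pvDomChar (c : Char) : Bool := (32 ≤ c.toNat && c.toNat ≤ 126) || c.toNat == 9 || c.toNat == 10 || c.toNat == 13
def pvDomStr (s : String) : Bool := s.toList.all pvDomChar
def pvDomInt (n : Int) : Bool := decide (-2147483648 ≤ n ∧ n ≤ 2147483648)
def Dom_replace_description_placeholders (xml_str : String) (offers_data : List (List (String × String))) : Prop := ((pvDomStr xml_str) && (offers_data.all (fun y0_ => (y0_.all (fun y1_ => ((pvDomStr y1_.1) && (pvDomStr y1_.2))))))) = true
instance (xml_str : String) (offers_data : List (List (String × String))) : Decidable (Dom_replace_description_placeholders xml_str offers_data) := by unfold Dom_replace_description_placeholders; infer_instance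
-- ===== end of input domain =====

-- B replaces A's per-offer repeated full-string `str.replace(..., 1)` rescans by one
-- left-to-right scan of the XML that consumes the offers' descriptions in order.
-- Shared literal constants of both Python sources:
def pRUl : List Char := "<description>DESCRIPTION_PLACEHOLDER_RU</description>".toList
def pUAl : List Char := "<description_ua>DESCRIPTION_PLACEHOLDER_UA</description_ua>".toList
def cdoRUl : List Char := "<description><![CDATA[".toList
def cdcRUl : List Char := "]]></description>".toList
def cdoUAl : List Char := "<description_ua><![CDATA[".toList
def cdcUAl : List Char := "]]></description_ua>".toList
-- f"<description><![CDATA[{d}]]></description>" (and the _ua variant):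
def pvRepRU (d : List Char) : List Char := cdoRUl ++ d ++ cdcRUl
def pvRepUA (d : List Char) : List Char := cdoUAl ++ d ++ cdcUAl
-- offer_data.get(k, "") on the association list (first match = dict lookup):
def pvGetD (offer : List (String × String)) (k : String) : String :=
  match offer.find? (fun kv => kv.1 == k) with
  | some kv => kv.2
  | none => ""

-- ===== PORT A =====
-- s.replace(old, new, 1): splice `new` over the first occurrence of `old`, if any.
def pvReplace1 (s old new : List Char) : List Char :=
  let i := PySem.Chars.find s old
  if i = -1 then s else s.take i.toNat ++ new ++ s.drop (i.toNat + old.length)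

def replace_description_placeholders (xml_str : String) (offers_data : List (List (String × String))) : String :=
  String.ofList (offers_data.foldl
    (fun s offer_data =>
      let description_ru := pvGetD offer_data "description"
      let description_ua := pvGetD offer_data "description_ua"
      let s1 := pvReplace1 s pRUl (pvRepRU description_ru.toList)
      pvReplace1 s1 pUAl (pvRepUA description_ua.toList))
    xml_str.toList)

-- ===== PORT B =====
-- the while-loop of Source B, recursing on the yet-unprocessed suffix of the string:
-- xml_str.find(P, pos) is ported as PySem.Chars.find on the dropped suffix
-- (occurrence positions relative to `pos`), which is exact.
def pvScan2 (s : List Char) (rus uas : List (List Char)) : List Char :=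
  let i := if rus ≠ [] then PySem.Chars.find s pRUl else -1
  let j := if uas ≠ [] then PySem.Chars.find s pUAl else -1
  if h1 : i = -1 ∧ j = -1 then s
  else if h2 : i ≠ -1 ∧ (j = -1 ∨ i < j) then
    s.take i.toNat ++ pvRepRU (rus.headD []) ++
      pvScan2 (s.drop (i.toNat + pRUl.length)) rus.tail uas
  else
    s.take j.toNat ++ pvRepUA (uas.headD []) ++
      pvScan2 (s.drop (j.toNat + pUAl.length)) rus uas.tail
  termination_by s.length
  decreasing_by
  · have hi : PySem.Chars.find s pRUl ≠ -1 := by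
      intro hfind
      apply h2.1
      show (if rus ≠ [] then PySem.Chars.find s pRUl else -1) = -1
      by_cases hr : rus = []
      · simp [hr]
      · simp [hr, hfind]
    have hinf := (PySem.Chars.find_ne_neg_one_iff s pRUl).mp hi
    have hle := hinf.length_le
    have hp : 0 < pRUl.length := by decide
    simp only [List.length_drop]
    omega
  · have hj : PySem.Chars.find s pUAl ≠ -1 := by
      intro hfind
      have hj0 : (if uas ≠ [] then PySem.Chars.find s pUAl else -1) = -1 := by
        by_cases hu : uas = []
        · simp [hu]
        · simp [hu, hfind]
      exact h2 ⟨fun hi0 => h1 ⟨hi0, show _ = -1 from hj0⟩, Or.inl (show _ = -1 from hj0)⟩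
    have hinf := (PySem.Chars.find_ne_neg_one_iff s pUAl).mp hj
    have hle := hinf.length_le
    have hp : 0 < pUAl.length := by decide
    simp only [List.length_drop]
    omega

def replace_description_placeholders_alt (xml_str : String) (offers_data : List (List (String × String))) : String :=
  String.ofList (pvScan2 xml_str.toList
    (offers_data.map (fun o => (pvGetD o "description").toList))
    (offers_data.map (fun o => (pvGetD o "description_ua").toList)))

-- ===== PRECONDITION & SPEC =====
-- Pre_ excludes self-referential inputs: offers whose description values themselves
-- contain a full placeholder tag, where A's repeated full-string rescans re-replace
-- text inside previously inserted CDATA blocks (an artefact of A's implementation).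
def Pre_replace_description_placeholders (xml_str : String) (offers_data : List (List (String × String))) : Prop :=
  ∀ offer ∈ offers_data,
    (¬ pRUl <:+: (pvGetD offer "description").toList) ∧
    (¬ pUAl <:+: (pvGetD offer "description").toList) ∧
    (¬ pRUl <:+: (pvGetD offer "description_ua").toList) ∧
    (¬ pUAl <:+: (pvGetD offer "description_ua").toList)
instance (xml_str : String) (offers_data : List (List (String × String))) : Decidable (Pre_replace_description_placeholders xml_str offers_data) := by unfold Pre_replace_description_placeholders; infer_instance

def pvWitness_replace_description_placeholders : String × (List (List (String × String))) :=
  ("<a/>", [[("description", "Hi"), ("description_ua", "Vi")]])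

def Spec_replace_description_placeholders (xml_str : String) (offers_data : List (List (String × String))) (out : String) : Prop := out = replace_description_placeholders_alt xml_str offers_data
instance (xml_str : String) (offers_data : List (List (String × String))) (out : String) : Decidable (Spec_replace_description_placeholders xml_str offers_data out) := by unfold Spec_replace_description_placeholders; infer_instance

-- ===== CLAIM (what is proved, stated in full; the proofs are below) =====
def Claim_equal_replace_description_placeholders : Prop := ∀ (xml_str : String) (offers_data : List (List (String × String))), Dom_replace_description_placeholders xml_str offers_data → Pre_replace_description_placeholders xml_str offers_data → Spec_replace_description_placeholders xml_str offers_data (replace_description_placeholders xml_str offers_data)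

-- ===== LEMMAS AND PROOFS =====

-- char-by-char reference scan: the proof-layer bridge between A's foldl of
-- single replacements and B's find-and-jump loop
def pvScan : List Char → List (List Char) → List (List Char) → List Char
  | [], _, _ => []
  | c :: rest, rus, uas =>
    if rus ≠ [] ∧ pRUl.isPrefixOf (c :: rest) then
      pvRepRU (rus.headD []) ++ pvScan ((c :: rest).drop pRUl.length) rus.tail uas
    else if uas ≠ [] ∧ pUAl.isPrefixOf (c :: rest) then
      pvRepUA (uas.headD []) ++ pvScan ((c :: rest).drop pUAl.length) rus uas.tail
    else c :: pvScan rest rus uas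
  termination_by s _ _ => s.length
  decreasing_by
  all_goals simp only [List.length_drop, List.length_cons]
  · have h : 0 < pRUl.length := by decide
    omega
  · have h : 0 < pUAl.length := by decide
    omega
  · omega


lemma pvScan_nil (rus uas : List (List Char)) : pvScan [] rus uas = [] := by
  rw [pvScan.eq_def]

lemma pvScan_cons (c : Char) (rest : List Char) (rus uas : List (List Char)) :
    pvScan (c :: rest) rus uas =
    if rus ≠ [] ∧ pRUl.isPrefixOf (c :: rest) then
      pvRepRU (rus.headD []) ++ pvScan ((c :: rest).drop pRUl.length) rus.tail uas
    else if uas ≠ [] ∧ pUAl.isPrefixOf (c :: rest) then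
      pvRepUA (uas.headD []) ++ pvScan ((c :: rest).drop pUAl.length) rus uas.tail
    else c :: pvScan rest rus uas := by
  rw [pvScan.eq_def]

-- a position-wise disagreement between two char lists (within both lengths)
def pvMism (a b : List Char) : Bool :=
  (List.range (min a.length b.length)).any (fun j => a[j]? != b[j]?)

lemma pfx_getElem? {a l : List Char} (h : a <+: l) {i : Nat} (hi : i < a.length) :
    l[i]? = a[i]? := by
  obtain ⟨t, rfl⟩ := h; rw [List.getElem?_append_left hi]

lemma not_pfx_of_mism {a b : List Char} (h : pvMism a b = true) (z : List Char) :
    ¬ a <+: b ++ z := by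
  intro hp
  rcases List.any_eq_true.mp h with ⟨j, hj, hne⟩
  rw [List.mem_range, lt_min_iff] at hj
  have h1 : (b ++ z)[j]? = a[j]? := pfx_getElem? hp hj.1
  rw [List.getElem?_append_left hj.2] at h1
  simp only [bne_iff_ne, ne_eq] at hne
  exact hne h1.symm

lemma pfx_append_iff_of_le {p x : List Char} (t : List Char) (h : p.length ≤ x.length) :
    p <+: x ++ t ↔ p <+: x :=
  ⟨fun hp => List.prefix_of_prefix_length_le hp (List.prefix_append x t) h,
   fun hp => hp.trans (List.prefix_append x t)⟩

lemma drop_pfx_of_pfx_append {p x t : List Char} (h : p <+: x ++ t) (hx : x.length ≤ p.length) :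
    p.drop x.length <+: t := by
  obtain ⟨u, hu⟩ := h
  have ht : t = p.drop x.length ++ u := by
    have := congrArg (List.drop x.length) hu
    rw [List.drop_append_of_le_length hx, List.drop_left] at this
    exact this.symm
  exact ht ▸ ⟨u, rfl⟩

lemma infix_of_pfx_drop {p d : List Char} {k : Nat} (h : p <+: d.drop k) : p <:+: d :=
  h.isInfix.trans (List.drop_suffix k d).isInfix

lemma not_infix_drop {p s : List Char} (k : Nat) (h : ¬ p <:+: s) : ¬ p <:+: s.drop k :=
  fun hin => h (hin.trans (List.drop_suffix k s).isInfix)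

-- no occurrence of the pattern p can start inside an inserted CDATA replacement
lemma safe_rep (p cdo cdc d y : List Char)
    (hcdo : cdo[cdo.length - 1]? = some '[') (hol : 0 < cdo.length)
    (hcdc : cdc[0]? = some ']')
    (hbr1 : '[' ∉ p) (hbr2 : ']' ∉ p) (hplen : cdo.length ≤ p.length)
    (hm : ∀ m, m < cdc.length → pvMism p (cdc.drop m) = true)
    (hd : ¬ p <:+: d) :
    ∀ j, j < cdo.length + d.length + cdc.length → ¬ p <+: (cdo ++ d ++ cdc).drop j ++ y := by
  intro j hj hp
  have hcdcpos : 0 < cdc.length := by cases cdc <;> simp_all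
  rw [List.append_assoc] at hp
  rcases lt_or_ge j cdo.length with hcase | hcase
  · -- the occurrence would cover the '[' that closes "<![CDATA["
    rw [List.drop_append_of_le_length (le_of_lt hcase), List.append_assoc] at hp
    set i := cdo.length - 1 - j with hi
    have hilt : i < (cdo.drop j).length := by
      rw [List.length_drop]; omega
    have hip : i < p.length := by
      have := hplen; omega
    have h1 : p[i]? = some '[' := by
      rw [← pfx_getElem? hp hip, List.getElem?_append_left hilt, List.getElem?_drop]
      have : j + i = cdo.length - 1 := by omega
      rw [this, hcdo]
    exact hbr1 (List.mem_of_getElem? h1)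
  · rcases lt_or_ge j (cdo.length + d.length) with hcase2 | hcase2
    · -- the occurrence starts inside the description d
      set k := j - cdo.length with hk
      have hkd : k < d.length := by omega
      rw [List.drop_append, List.drop_of_length_le (by omega : cdo.length ≤ j),
        List.nil_append, List.drop_append_of_le_length (le_of_lt hkd), List.append_assoc] at hp
      rcases Nat.lt_or_ge (d.drop k).length p.length with hsub' | hsub
      swap
      · -- entirely inside d: contradicts hd
        exact hd (infix_of_pfx_drop ((pfx_append_iff_of_le _ hsub).mp hp))
      · -- long enough to cover the first ']' of the closing "]]>"
        set i := (d.drop k).length with hi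
        have h1 : p[i]? = some ']' := by
          rw [← pfx_getElem? hp hsub', List.getElem?_append_right (le_refl _)]
          rw [Nat.sub_self, List.getElem?_append_left hcdcpos, hcdc]
        exact hbr2 (List.mem_of_getElem? h1)
    · -- the occurrence starts inside the closing "]]></description…>"
      set m := j - (cdo.length + d.length) with hm2
      have hmlt : m < cdc.length := by omega
      rw [List.drop_append, List.drop_of_length_le (by omega : cdo.length ≤ j),
        List.nil_append, List.drop_append,
        List.drop_of_length_le (by omega : d.length ≤ j - cdo.length)] at hp
      have : j - cdo.length - d.length = m := by omega
      rw [List.nil_append, this] at hp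
      exact not_pfx_of_mism (hm m hmlt) y hp

lemma scan_append (x t : List Char) (rus uas : List (List Char))
    (hx : ∀ j, j < x.length →
      (rus = [] ∨ ¬ pRUl <+: x.drop j ++ t) ∧ (uas = [] ∨ ¬ pUAl <+: x.drop j ++ t)) :
    pvScan (x ++ t) rus uas = x ++ pvScan t rus uas := by
  induction x with
  | nil => simp
  | cons c x' ih =>
    have h0 := hx 0 (by simp)
    simp only [List.drop_zero, List.cons_append] at h0
    simp only [List.cons_append]
    rw [pvScan_cons]
    rw [if_neg (by
      rintro ⟨hne, hpf⟩
      rcases h0.1 with h | h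
      · exact hne h
      · exact h (List.isPrefixOf_iff_prefix.mp hpf))]
    rw [if_neg (by
      rintro ⟨hne, hpf⟩
      rcases h0.2 with h | h
      · exact hne h
      · exact h (List.isPrefixOf_iff_prefix.mp hpf))]
    congr 1
    exact ih (fun j hj => by
      have := hx (j + 1) (by simp; omega)
      simpa using this)

lemma scan_nil_nil (s : List Char) : pvScan s [] [] = s := by
  induction s with
  | nil => exact pvScan_nil [] []
  | cons c rest ih => rw [pvScan_cons]; simp [ih]

lemma scan_skip_ru : ∀ n (s : List Char), s.length ≤ n → ¬ pRUl <:+: s →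
    ∀ rus rus' uas, pvScan s rus uas = pvScan s rus' uas := by
  intro n
  induction n with
  | zero =>
    intro s hs _ rus rus' uas
    rw [List.length_eq_zero_iff.mp (Nat.le_zero.mp hs), pvScan_nil, pvScan_nil]
  | succ n ih =>
    intro s hs hinf rus rus' uas
    match s with
    | [] => rw [pvScan_nil, pvScan_nil]
    | c :: rest =>
      have hnp : ¬ pRUl.isPrefixOf (c :: rest) = true := fun h =>
        hinf (List.isPrefixOf_iff_prefix.mp h).isInfix
      have hcond : ¬ (rus ≠ [] ∧ pRUl.isPrefixOf (c :: rest) = true) := fun h => hnp h.2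
      have hcond' : ¬ (rus' ≠ [] ∧ pRUl.isPrefixOf (c :: rest) = true) := fun h => hnp h.2
      rw [pvScan_cons, pvScan_cons, if_neg hcond, if_neg hcond']
      by_cases hc : uas ≠ [] ∧ pUAl.isPrefixOf (c :: rest)
      · rw [if_pos hc, if_pos hc]
        congr 1
        exact ih _ (by
          have hpos : 0 < pUAl.length := by decide
          simp only [List.length_drop, List.length_cons] at hs ⊢
          omega) (not_infix_drop _ hinf) rus rus' uas.tail
      · rw [if_neg hc, if_neg hc]
        congr 1
        exact ih rest (by simpa using hs) (not_infix_drop 1 hinf) rus rus' uas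

lemma scan_skip_ua : ∀ n (s : List Char), s.length ≤ n → ¬ pUAl <:+: s →
    ∀ rus uas uas', pvScan s rus uas = pvScan s rus uas' := by
  intro n
  induction n with
  | zero =>
    intro s hs _ rus uas uas'
    rw [List.length_eq_zero_iff.mp (Nat.le_zero.mp hs), pvScan_nil, pvScan_nil]
  | succ n ih =>
    intro s hs hinf rus uas uas'
    match s with
    | [] => rw [pvScan_nil, pvScan_nil]
    | c :: rest =>
      have hnp : ¬ pUAl.isPrefixOf (c :: rest) = true := fun h =>
        hinf (List.isPrefixOf_iff_prefix.mp h).isInfix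
      rw [pvScan_cons, pvScan_cons]
      by_cases hc : rus ≠ [] ∧ pRUl.isPrefixOf (c :: rest)
      · rw [if_pos hc, if_pos hc]
        congr 1
        exact ih _ (by
          have hpos : 0 < pRUl.length := by decide
          simp only [List.length_drop, List.length_cons] at hs ⊢
          omega) (not_infix_drop _ hinf) rus.tail uas uas'
      · have hcond : ¬ (uas ≠ [] ∧ pUAl.isPrefixOf (c :: rest) = true) := fun h => hnp h.2
        have hcond' : ¬ (uas' ≠ [] ∧ pUAl.isPrefixOf (c :: rest) = true) := fun h => hnp h.2
        rw [if_neg hc, if_neg hc, if_neg hcond, if_neg hcond']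
        congr 1
        exact ih rest (by simpa using hs) (not_infix_drop 1 hinf) rus uas uas'

-- decidable disagreement facts between the fixed pattern/CDATA literals
lemma mism_PQ : pvMism pRUl pUAl = true := by decide
lemma mism_F1 : ∀ m, m < pUAl.length → 0 < m → pvMism (pUAl.drop m) pRUl = true := by decide
lemma mism_F2 : ∀ m, m < pRUl.length → 0 < m → pvMism (pRUl.drop m) pUAl = true := by decide
lemma mism_F3 : ∀ m, m < pRUl.length → 0 < m → pvMism (pRUl.drop m) cdoRUl = true := by decide
lemma mism_F4 : ∀ m, m < pRUl.length → 0 < m → pvMism (pRUl.drop m) cdoUAl = true := by decide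
lemma mism_F5 : ∀ m, m < pUAl.length → 0 < m → pvMism (pUAl.drop m) cdoRUl = true := by decide
lemma mism_F6 : ∀ m, m < pUAl.length → 0 < m → pvMism (pUAl.drop m) cdoUAl = true := by decide

lemma safe_repRU (r y : List Char) (hr1 : ¬ pRUl <:+: r) (hr2 : ¬ pUAl <:+: r) :
    ∀ j, j < (pvRepRU r).length →
      ¬ pRUl <+: (pvRepRU r).drop j ++ y ∧ ¬ pUAl <+: (pvRepRU r).drop j ++ y := by
  intro j hj
  have hlen : (pvRepRU r).length = cdoRUl.length + r.length + cdcRUl.length := by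
    simp [pvRepRU]; omega
  rw [hlen] at hj
  exact ⟨safe_rep pRUl cdoRUl cdcRUl r y (by decide) (by decide) (by decide) (by decide)
      (by decide) (by decide) (by decide) hr1 j hj,
    safe_rep pUAl cdoRUl cdcRUl r y (by decide) (by decide) (by decide) (by decide)
      (by decide) (by decide) (by decide) hr2 j hj⟩

lemma safe_repUA (u y : List Char) (hu1 : ¬ pRUl <:+: u) (hu2 : ¬ pUAl <:+: u) :
    ∀ j, j < (pvRepUA u).length →
      ¬ pRUl <+: (pvRepUA u).drop j ++ y ∧ ¬ pUAl <+: (pvRepUA u).drop j ++ y := by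
  intro j hj
  have hlen : (pvRepUA u).length = cdoUAl.length + u.length + cdcUAl.length := by
    simp [pvRepUA]; omega
  rw [hlen] at hj
  exact ⟨safe_rep pRUl cdoUAl cdcUAl u y (by decide) (by decide) (by decide) (by decide)
      (by decide) (by decide) (by decide) hu1 j hj,
    safe_rep pUAl cdoUAl cdcUAl u y (by decide) (by decide) (by decide) (by decide)
      (by decide) (by decide) (by decide) hu2 j hj⟩

lemma step_ru_base (y r : List Char) (rus uas : List (List Char))
    (hr1 : ¬ pRUl <:+: r) (hr2 : ¬ pUAl <:+: r) :
    pvScan (pvRepRU r ++ y) rus uas = pvScan (pRUl ++ y) (r :: rus) uas := by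
  rw [scan_append (pvRepRU r) y rus uas (fun j hj =>
    ⟨Or.inr (safe_repRU r y hr1 hr2 j hj).1, Or.inr (safe_repRU r y hr1 hr2 j hj).2⟩)]
  rcases hE : pRUl ++ y with _ | ⟨c, rest⟩
  · exact absurd (List.append_eq_nil_iff.mp hE).1 (by decide)
  · rw [pvScan_cons, ← hE]
    rw [if_pos ⟨by simp, List.isPrefixOf_iff_prefix.mpr (List.prefix_append pRUl y)⟩]
    rw [List.drop_left]
    rfl

lemma step_ru : ∀ n (x y r : List Char) (rus uas : List (List Char)), x.length ≤ n →
    (¬ pRUl <:+: r) → (¬ pUAl <:+: r) →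
    (∀ j, j < x.length → ¬ pRUl <+: x.drop j ++ (pRUl ++ y)) →
    pvScan (x ++ pvRepRU r ++ y) rus uas = pvScan (x ++ pRUl ++ y) (r :: rus) uas := by
  intro n
  induction n with
  | zero =>
    intro x y r rus uas hxn hr1 hr2 _
    rw [List.length_eq_zero_iff.mp (Nat.le_zero.mp hxn)]
    simpa using step_ru_base y r rus uas hr1 hr2
  | succ n ih =>
    intro x y r rus uas hxn hr1 hr2 hfirst
    match x with
    | [] => simpa using step_ru_base y r rus uas hr1 hr2
    | c :: x' =>
      have hxpos : 0 < (c :: x').length := by simp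
      have h0 := hfirst 0 hxpos
      rw [List.drop_zero] at h0
      -- the RU placeholder is a prefix of neither side
      have hT2ru : ¬ pRUl <+: (c :: x') ++ (pRUl ++ y) := h0
      have hT1ru : ¬ pRUl <+: (c :: x') ++ (pvRepRU r ++ y) := by
        rcases Nat.lt_or_ge (c :: x').length pRUl.length with hlt | hge
        · intro hp
          have hd := drop_pfx_of_pfx_append hp (le_of_lt hlt)
          rw [show pvRepRU r ++ y = cdoRUl ++ (r ++ cdcRUl ++ y) by simp [pvRepRU]] at hd
          exact not_pfx_of_mism (mism_F3 _ hlt hxpos) _ hd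
        · rw [pfx_append_iff_of_le _ hge]
          rw [pfx_append_iff_of_le _ hge] at hT2ru
          exact hT2ru
      -- the UA placeholder is a prefix of one side iff it is of the other
      have hUAiff : (pUAl <+: (c :: x') ++ (pvRepRU r ++ y)) ↔
          (pUAl <+: (c :: x') ++ (pRUl ++ y)) := by
        rcases Nat.lt_or_ge (c :: x').length pUAl.length with hlt | hge
        · constructor <;> intro hp
          · have hd := drop_pfx_of_pfx_append hp (le_of_lt hlt)
            rw [show pvRepRU r ++ y = cdoRUl ++ (r ++ cdcRUl ++ y) by simp [pvRepRU]] at hd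
            exact absurd hd (not_pfx_of_mism (mism_F5 _ hlt hxpos) _)
          · have hd := drop_pfx_of_pfx_append hp (le_of_lt hlt)
            exact absurd hd (not_pfx_of_mism (mism_F1 _ hlt hxpos) _)
        · rw [pfx_append_iff_of_le _ hge, pfx_append_iff_of_le _ hge]
      simp only [List.append_assoc, List.cons_append]
      rw [pvScan_cons, pvScan_cons]
      simp only [List.cons_append] at hT1ru hT2ru hUAiff
      have hc1 : ¬ (rus ≠ [] ∧ pRUl.isPrefixOf (c :: (x' ++ (pvRepRU r ++ y))) = true) :=
        fun h => hT1ru (List.isPrefixOf_iff_prefix.mp h.2)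
      have hc2 : ¬ (r :: rus ≠ [] ∧ pRUl.isPrefixOf (c :: (x' ++ (pRUl ++ y))) = true) :=
        fun h => hT2ru (List.isPrefixOf_iff_prefix.mp h.2)
      rw [if_neg hc1, if_neg hc2]
      by_cases huas : uas ≠ [] ∧ pUAl.isPrefixOf (c :: (x' ++ (pRUl ++ y)))
      · have huas' : uas ≠ [] ∧ pUAl.isPrefixOf (c :: (x' ++ (pvRepRU r ++ y))) = true :=
          ⟨huas.1, List.isPrefixOf_iff_prefix.mpr
            (hUAiff.mpr (List.isPrefixOf_iff_prefix.mp huas.2))⟩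
        rw [if_pos huas', if_pos huas]
        congr 1
        have hgeUA : pUAl.length ≤ (c :: x').length := by
          by_contra hlt
          rw [Nat.not_le] at hlt
          exact absurd (drop_pfx_of_pfx_append
              (by simpa using List.isPrefixOf_iff_prefix.mp huas.2) (le_of_lt hlt))
            (not_pfx_of_mism (mism_F1 _ hlt hxpos) _)
        have hdrop : ∀ (A : List Char), (c :: (x' ++ (A ++ y))).drop pUAl.length
            = (c :: x').drop pUAl.length ++ (A ++ y) := by
          intro A
          rw [show c :: (x' ++ (A ++ y)) = (c :: x') ++ (A ++ y) by simp]
          exact List.drop_append_of_le_length hgeUA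
        rw [hdrop, hdrop]
        have := ih ((c :: x').drop pUAl.length) y r rus uas.tail
          (by
            have hL : 0 < pUAl.length := by decide
            simp only [List.length_drop, List.length_cons] at hxn ⊢
            omega)
          hr1 hr2
          (fun j hj => by
            rw [List.drop_drop]
            exact hfirst (pUAl.length + j) (by
              simp only [List.length_drop] at hj
              omega))
        simpa using this
      · have huas' : ¬ (uas ≠ [] ∧ pUAl.isPrefixOf (c :: (x' ++ (pvRepRU r ++ y))) = true) :=
          fun h => huas ⟨h.1, List.isPrefixOf_iff_prefix.mpr
            (hUAiff.mp (List.isPrefixOf_iff_prefix.mp h.2))⟩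
        rw [if_neg huas', if_neg huas]
        congr 1
        have := ih x' y r rus uas
          (by simpa using hxn)
          hr1 hr2
          (fun j hj => by
            have := hfirst (j + 1) (by simp; omega)
            simpa using this)
        simpa using this

lemma step_ua_base (y u : List Char) (rus uas : List (List Char))
    (hu1 : ¬ pRUl <:+: u) (hu2 : ¬ pUAl <:+: u) :
    pvScan (pvRepUA u ++ y) rus uas = pvScan (pUAl ++ y) rus (u :: uas) := by
  rw [scan_append (pvRepUA u) y rus uas (fun j hj =>
    ⟨Or.inr (safe_repUA u y hu1 hu2 j hj).1, Or.inr (safe_repUA u y hu1 hu2 j hj).2⟩)]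
  rcases hE : pUAl ++ y with _ | ⟨c, rest⟩
  · exact absurd (List.append_eq_nil_iff.mp hE).1 (by decide)
  · rw [pvScan_cons, ← hE]
    rw [if_neg (fun h => not_pfx_of_mism mism_PQ y (List.isPrefixOf_iff_prefix.mp h.2))]
    rw [if_pos ⟨by simp, List.isPrefixOf_iff_prefix.mpr (List.prefix_append pUAl y)⟩]
    rw [List.drop_left]
    rfl

lemma step_ua : ∀ n (x y u : List Char) (rus uas : List (List Char)), x.length ≤ n →
    (¬ pRUl <:+: u) → (¬ pUAl <:+: u) →
    (∀ j, j < x.length → ¬ pUAl <+: x.drop j ++ (pUAl ++ y)) →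
    pvScan (x ++ pvRepUA u ++ y) rus uas = pvScan (x ++ pUAl ++ y) rus (u :: uas) := by
  intro n
  induction n with
  | zero =>
    intro x y u rus uas hxn hu1 hu2 _
    rw [List.length_eq_zero_iff.mp (Nat.le_zero.mp hxn)]
    simpa using step_ua_base y u rus uas hu1 hu2
  | succ n ih =>
    intro x y u rus uas hxn hu1 hu2 hfirst
    match x with
    | [] => simpa using step_ua_base y u rus uas hu1 hu2
    | c :: x' =>
      have hxpos : 0 < (c :: x').length := by simp
      have h0 := hfirst 0 hxpos
      rw [List.drop_zero] at h0
      -- the UA placeholder is a prefix of neither side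
      have hT2ua : ¬ pUAl <+: (c :: x') ++ (pUAl ++ y) := h0
      have hT1ua : ¬ pUAl <+: (c :: x') ++ (pvRepUA u ++ y) := by
        rcases Nat.lt_or_ge (c :: x').length pUAl.length with hlt | hge
        · intro hp
          have hd := drop_pfx_of_pfx_append hp (le_of_lt hlt)
          rw [show pvRepUA u ++ y = cdoUAl ++ (u ++ cdcUAl ++ y) by simp [pvRepUA]] at hd
          exact not_pfx_of_mism (mism_F6 _ hlt hxpos) _ hd
        · rw [pfx_append_iff_of_le _ hge]
          rw [pfx_append_iff_of_le _ hge] at hT2ua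
          exact hT2ua
      -- the RU placeholder is a prefix of one side iff it is of the other
      have hRUiff : (pRUl <+: (c :: x') ++ (pvRepUA u ++ y)) ↔
          (pRUl <+: (c :: x') ++ (pUAl ++ y)) := by
        rcases Nat.lt_or_ge (c :: x').length pRUl.length with hlt | hge
        · constructor <;> intro hp
          · have hd := drop_pfx_of_pfx_append hp (le_of_lt hlt)
            rw [show pvRepUA u ++ y = cdoUAl ++ (u ++ cdcUAl ++ y) by simp [pvRepUA]] at hd
            exact absurd hd (not_pfx_of_mism (mism_F4 _ hlt hxpos) _)
          · have hd := drop_pfx_of_pfx_append hp (le_of_lt hlt)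
            exact absurd hd (not_pfx_of_mism (mism_F2 _ hlt hxpos) _)
        · rw [pfx_append_iff_of_le _ hge, pfx_append_iff_of_le _ hge]
      simp only [List.append_assoc, List.cons_append]
      rw [pvScan_cons, pvScan_cons]
      simp only [List.cons_append] at hT1ua hT2ua hRUiff
      by_cases hrus : rus ≠ [] ∧ pRUl.isPrefixOf (c :: (x' ++ (pUAl ++ y)))
      · have hrus' : rus ≠ [] ∧ pRUl.isPrefixOf (c :: (x' ++ (pvRepUA u ++ y))) = true :=
          ⟨hrus.1, List.isPrefixOf_iff_prefix.mpr
            (hRUiff.mpr (List.isPrefixOf_iff_prefix.mp hrus.2))⟩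
        rw [if_pos hrus', if_pos hrus]
        congr 1
        have hgeRU : pRUl.length ≤ (c :: x').length := by
          by_contra hlt
          rw [Nat.not_le] at hlt
          exact absurd (drop_pfx_of_pfx_append
              (by simpa using List.isPrefixOf_iff_prefix.mp hrus.2) (le_of_lt hlt))
            (not_pfx_of_mism (mism_F2 _ hlt hxpos) _)
        have hdrop : ∀ (A : List Char), (c :: (x' ++ (A ++ y))).drop pRUl.length
            = (c :: x').drop pRUl.length ++ (A ++ y) := by
          intro A
          rw [show c :: (x' ++ (A ++ y)) = (c :: x') ++ (A ++ y) by simp]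
          exact List.drop_append_of_le_length hgeRU
        rw [hdrop, hdrop]
        have := ih ((c :: x').drop pRUl.length) y u rus.tail uas
          (by
            have hL : 0 < pRUl.length := by decide
            simp only [List.length_drop, List.length_cons] at hxn ⊢
            omega)
          hu1 hu2
          (fun j hj => by
            rw [List.drop_drop]
            exact hfirst (pRUl.length + j) (by
              simp only [List.length_drop] at hj
              omega))
        simpa using this
      · have hrus' : ¬ (rus ≠ [] ∧ pRUl.isPrefixOf (c :: (x' ++ (pvRepUA u ++ y))) = true) :=
          fun h => hrus ⟨h.1, List.isPrefixOf_iff_prefix.mpr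
            (hRUiff.mp (List.isPrefixOf_iff_prefix.mp h.2))⟩
        rw [if_neg hrus', if_neg hrus]
        have hc1 : ¬ (uas ≠ [] ∧ pUAl.isPrefixOf (c :: (x' ++ (pvRepUA u ++ y))) = true) :=
          fun h => hT1ua (List.isPrefixOf_iff_prefix.mp h.2)
        have hc2 : ¬ (u :: uas ≠ [] ∧ pUAl.isPrefixOf (c :: (x' ++ (pUAl ++ y))) = true) :=
          fun h => hT2ua (List.isPrefixOf_iff_prefix.mp h.2)
        rw [if_neg hc1, if_neg hc2]
        congr 1
        have := ih x' y u rus uas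
          (by simpa using hxn)
          hu1 hu2
          (fun j hj => by
            have := hfirst (j + 1) (by simp; omega)
            simpa using this)
        simpa using this

lemma replace1_no_occ (s p r : List Char) (h : ¬ p <:+: s) : pvReplace1 s p r = s := by
  simp only [pvReplace1]
  rw [if_pos ((PySem.Chars.find_eq_neg_one_iff s p).mpr h)]

-- first-occurrence decomposition of s.replace(p, r, 1) when p occurs in s
lemma replace1_occ (s p r : List Char) (h : p <:+: s) (hp : p ≠ []) :
    ∃ x y : List Char,
      s = x ++ p ++ y ∧
      pvReplace1 s p r = x ++ r ++ y ∧
      (∀ j, j < x.length → ¬ p <+: s.drop j) := by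
  have hfind0 : 0 ≤ PySem.Chars.find s p := (PySem.Chars.find_nonneg_iff s p).mpr h
  obtain ⟨hat, hmin⟩ := PySem.Chars.find_spec hfind0
  set i := (PySem.Chars.find s p).toNat with hi
  obtain ⟨t, ht⟩ := hat
  have hile : i ≤ s.length := by
    by_contra hgt
    rw [Nat.not_le] at hgt
    rw [List.drop_of_length_le (le_of_lt hgt)] at ht
    exact hp (List.append_eq_nil_iff.mp ht).1
  have htval : t = s.drop (i + p.length) := by
    have := congrArg (List.drop p.length) ht
    rw [List.drop_left, List.drop_drop] at this
    exact this
  refine ⟨s.take i, s.drop (i + p.length), ?_, ?_, ?_⟩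
  · conv_lhs => rw [← List.take_append_drop i s]
    rw [List.append_assoc, ← ht, htval]
  · simp only [pvReplace1]
    rw [if_neg (by
      intro hneg
      rw [hneg] at hfind0
      exact absurd hfind0 (by decide))]
  · intro j hj
    rw [List.length_take] at hj
    exact hmin j (by omega)

lemma lem_ru (r : List Char) (hr1 : ¬ pRUl <:+: r) (hr2 : ¬ pUAl <:+: r)
    (s : List Char) (rus uas : List (List Char)) :
    pvScan (pvReplace1 s pRUl (pvRepRU r)) rus uas = pvScan s (r :: rus) uas := by
  by_cases hocc : pRUl <:+: s
  · obtain ⟨x, y, hs, hrepl, hmin⟩ := replace1_occ s pRUl (pvRepRU r) hocc (by decide)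
    rw [hrepl]
    rw [hs] at hmin
    have := step_ru x.length x y r rus uas le_rfl hr1 hr2
      (fun j hj => by
        have h1 := hmin j hj
        rw [show (x ++ pRUl ++ y).drop j = x.drop j ++ (pRUl ++ y) by
          rw [List.append_assoc]
          exact List.drop_append_of_le_length (le_of_lt hj)] at h1
        exact h1)
    rw [this, ← hs]
  · rw [replace1_no_occ s pRUl (pvRepRU r) hocc]
    exact scan_skip_ru s.length s le_rfl hocc rus (r :: rus) uas

lemma lem_ua (u : List Char) (hu1 : ¬ pRUl <:+: u) (hu2 : ¬ pUAl <:+: u)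
    (s : List Char) (rus uas : List (List Char)) :
    pvScan (pvReplace1 s pUAl (pvRepUA u)) rus uas = pvScan s rus (u :: uas) := by
  by_cases hocc : pUAl <:+: s
  · obtain ⟨x, y, hs, hrepl, hmin⟩ := replace1_occ s pUAl (pvRepUA u) hocc (by decide)
    rw [hrepl]
    rw [hs] at hmin
    have := step_ua x.length x y u rus uas le_rfl hu1 hu2
      (fun j hj => by
        have h1 := hmin j hj
        rw [show (x ++ pUAl ++ y).drop j = x.drop j ++ (pUAl ++ y) by
          rw [List.append_assoc]
          exact List.drop_append_of_le_length (le_of_lt hj)] at h1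
        exact h1)
    rw [this, ← hs]
  · rw [replace1_no_occ s pUAl (pvRepUA u) hocc]
    exact scan_skip_ua s.length s le_rfl hocc rus uas (u :: uas)

lemma main_lemma : ∀ (offers : List (List (String × String))) (s : List Char),
    (∀ offer ∈ offers,
      (¬ pRUl <:+: (pvGetD offer "description").toList) ∧
      (¬ pUAl <:+: (pvGetD offer "description").toList) ∧
      (¬ pRUl <:+: (pvGetD offer "description_ua").toList) ∧
      (¬ pUAl <:+: (pvGetD offer "description_ua").toList)) →
    offers.foldl
      (fun s offer_data =>
        let description_ru := pvGetD offer_data "description"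
        let description_ua := pvGetD offer_data "description_ua"
        let s1 := pvReplace1 s pRUl (pvRepRU description_ru.toList)
        pvReplace1 s1 pUAl (pvRepUA description_ua.toList)) s
    = pvScan s (offers.map (fun o => (pvGetD o "description").toList))
               (offers.map (fun o => (pvGetD o "description_ua").toList)) := by
  intro offers
  induction offers with
  | nil => intro s _; simp [scan_nil_nil]
  | cons o os ih =>
    intro s hsafe
    obtain ⟨h1, h2, h3, h4⟩ := hsafe o (List.mem_cons_self)
    have hrest : _ := fun offer h => hsafe offer (List.mem_cons_of_mem o h)
    simp only [List.foldl_cons, List.map_cons]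
    rw [ih _ hrest, lem_ua _ h3 h4, lem_ru _ h1 h2]

-- ===== pvScan2 ↔ pvScan: B's find-and-jump loop equals the char-by-char scan =====

lemma pvScan2_branch1 (s : List Char) (rus uas : List (List Char))
    (h1 : (if rus ≠ [] then PySem.Chars.find s pRUl else -1) = -1 ∧
          (if uas ≠ [] then PySem.Chars.find s pUAl else -1) = -1) :
    pvScan2 s rus uas = s := by
  rw [pvScan2.eq_def]
  simp only []
  rw [dif_pos h1]

lemma pvScan2_branch2 (s : List Char) (rus uas : List (List Char))
    (h2 : (if rus ≠ [] then PySem.Chars.find s pRUl else -1) ≠ -1 ∧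
          ((if uas ≠ [] then PySem.Chars.find s pUAl else -1) = -1 ∨
           (if rus ≠ [] then PySem.Chars.find s pRUl else -1) <
             (if uas ≠ [] then PySem.Chars.find s pUAl else -1))) :
    pvScan2 s rus uas =
      s.take (if rus ≠ [] then PySem.Chars.find s pRUl else -1).toNat ++ pvRepRU (rus.headD []) ++
        pvScan2 (s.drop ((if rus ≠ [] then PySem.Chars.find s pRUl else -1).toNat + pRUl.length))
          rus.tail uas := by
  rw [pvScan2.eq_def]
  simp only []
  rw [dif_neg (fun hh => h2.1 hh.1), dif_pos h2]

lemma pvScan2_branch3 (s : List Char) (rus uas : List (List Char))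
    (h1 : ¬ ((if rus ≠ [] then PySem.Chars.find s pRUl else -1) = -1 ∧
             (if uas ≠ [] then PySem.Chars.find s pUAl else -1) = -1))
    (h2 : ¬ ((if rus ≠ [] then PySem.Chars.find s pRUl else -1) ≠ -1 ∧
          ((if uas ≠ [] then PySem.Chars.find s pUAl else -1) = -1 ∨
           (if rus ≠ [] then PySem.Chars.find s pRUl else -1) <
             (if uas ≠ [] then PySem.Chars.find s pUAl else -1)))) :
    pvScan2 s rus uas =
      s.take (if uas ≠ [] then PySem.Chars.find s pUAl else -1).toNat ++ pvRepUA (uas.headD []) ++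
        pvScan2 (s.drop ((if uas ≠ [] then PySem.Chars.find s pUAl else -1).toNat + pUAl.length))
          rus uas.tail := by
  rw [pvScan2.eq_def]
  simp only []
  rw [dif_neg h1, dif_neg h2]

lemma find_decomp (s p : List Char) (hp : p ≠ []) (h : PySem.Chars.find s p ≠ -1) :
    s = s.take (PySem.Chars.find s p).toNat ++ p ++
        s.drop ((PySem.Chars.find s p).toNat + p.length) ∧
    (∀ k, k < (PySem.Chars.find s p).toNat → ¬ p <+: s.drop k) ∧
    (s.take (PySem.Chars.find s p).toNat).length = (PySem.Chars.find s p).toNat := by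
  have hn1 := PySem.Chars.neg_one_le_find s p
  have hfind0 : 0 ≤ PySem.Chars.find s p := by omega
  obtain ⟨hat, hmin⟩ := PySem.Chars.find_spec hfind0
  set i := (PySem.Chars.find s p).toNat with hi
  obtain ⟨t, ht⟩ := hat
  have hile : i ≤ s.length := by
    by_contra hgt
    rw [Nat.not_le] at hgt
    rw [List.drop_of_length_le (le_of_lt hgt)] at ht
    exact hp (List.append_eq_nil_iff.mp ht).1
  have htval : t = s.drop (i + p.length) := by
    have := congrArg (List.drop p.length) ht
    rw [List.drop_left, List.drop_drop] at this
    exact this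
  refine ⟨?_, hmin, ?_⟩
  · conv_lhs => rw [← List.take_append_drop i s]
    rw [List.append_assoc, ← ht, htval]
  · rw [List.length_take]
    omega

lemma scan_all_done (s : List Char) (rus uas : List (List Char))
    (hru : rus = [] ∨ ¬ pRUl <:+: s) (hua : uas = [] ∨ ¬ pUAl <:+: s) :
    pvScan s rus uas = s := by
  have h1 : pvScan s rus uas = pvScan s [] uas := by
    rcases hru with h | h
    · rw [h]
    · exact scan_skip_ru s.length s le_rfl h rus [] uas
  have h2 : pvScan s [] uas = pvScan s [] [] := by
    rcases hua with h | h
    · rw [h]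
    · exact scan_skip_ua s.length s le_rfl h [] uas []
  rw [h1, h2, scan_nil_nil]

lemma both_at_same (s : List Char) (k : Nat)
    (hi : pRUl <+: s.drop k) (hj : pUAl <+: s.drop k) : False := by
  have h := List.prefix_of_prefix_length_le hi hj (by decide)
  have h2 := not_pfx_of_mism mism_PQ ([] : List Char)
  rw [List.append_nil] at h2
  exact h2 h

lemma pvScan2_eq : ∀ n (s : List Char), s.length ≤ n → ∀ rus uas,
    pvScan2 s rus uas = pvScan s rus uas := by
  intro n
  induction n with
  | zero =>
    intro s hs rus uas
    rw [List.length_eq_zero_iff.mp (Nat.le_zero.mp hs)]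
    rw [pvScan2_branch1 [] rus uas
      ⟨by by_cases h : rus = [] <;> simp [h] <;> decide,
       by by_cases h : uas = [] <;> simp [h] <;> decide⟩, pvScan_nil]
  | succ n ih =>
    intro s hs rus uas
    by_cases h1 : (if rus ≠ [] then PySem.Chars.find s pRUl else -1) = -1 ∧
                  (if uas ≠ [] then PySem.Chars.find s pUAl else -1) = -1
    · rw [pvScan2_branch1 s rus uas h1]
      rw [scan_all_done s rus uas ?_ ?_]
      · by_cases hr : rus = []
        · exact Or.inl hr
        · right
          have := h1.1
          rw [if_pos hr] at this
          exact (PySem.Chars.find_eq_neg_one_iff s pRUl).mp this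
      · by_cases hu : uas = []
        · exact Or.inl hu
        · right
          have := h1.2
          rw [if_pos hu] at this
          exact (PySem.Chars.find_eq_neg_one_iff s pUAl).mp this
    · by_cases h2 : (if rus ≠ [] then PySem.Chars.find s pRUl else -1) ≠ -1 ∧
          ((if uas ≠ [] then PySem.Chars.find s pUAl else -1) = -1 ∨
           (if rus ≠ [] then PySem.Chars.find s pRUl else -1) <
             (if uas ≠ [] then PySem.Chars.find s pUAl else -1))
      · -- next replacement is the RU placeholder
        have hrne : rus ≠ [] := by
          intro hr
          exact h2.1 (by rw [if_neg (fun hh => hh hr)])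
        have hfi : PySem.Chars.find s pRUl ≠ -1 := by
          have := h2.1
          rwa [if_pos hrne] at this
        have hge0 : 0 ≤ PySem.Chars.find s pRUl := by
          have := PySem.Chars.neg_one_le_find s pRUl
          omega
        obtain ⟨hdec, hmin, hxlen⟩ := find_decomp s pRUl (by decide) hfi
        rw [pvScan2_branch2 s rus uas h2, if_pos hrne]
        conv_rhs => rw [hdec, List.append_assoc]
        rw [scan_append _ _ rus uas (fun k hk => by
          rw [hxlen] at hk
          have hdk : (s.take (PySem.Chars.find s pRUl).toNat).drop k ++
              (pRUl ++ s.drop ((PySem.Chars.find s pRUl).toNat + pRUl.length)) = s.drop k := by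
            conv_rhs => rw [hdec]
            rw [List.append_assoc]
            exact (List.drop_append_of_le_length (by rw [hxlen]; omega)).symm
          constructor
          · right
            rw [hdk]
            exact hmin k hk
          · rcases h2.2 with hj | hj
            · by_cases hu : uas = []
              · exact Or.inl hu
              · right
                rw [if_pos hu] at hj
                rw [hdk]
                intro hpf
                exact (PySem.Chars.find_eq_neg_one_iff s pUAl).mp hj (infix_of_pfx_drop hpf)
            · right
              by_cases hu : uas = []
              · rw [if_pos hrne, if_neg (fun hh : uas ≠ [] => hh hu)] at hj
                omega
              · rw [if_pos hu, if_pos hrne] at hj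
                have hj0 : 0 ≤ PySem.Chars.find s pUAl := by omega
                obtain ⟨-, hminUA⟩ := PySem.Chars.find_spec hj0
                rw [hdk]
                exact hminUA k (by omega))]
        rcases hE : pRUl ++ s.drop ((PySem.Chars.find s pRUl).toNat + pRUl.length)
          with _ | ⟨c, rest⟩
        · exact absurd (List.append_eq_nil_iff.mp hE).1 (by decide)
        · rw [pvScan_cons, ← hE]
          rw [if_pos ⟨hrne, List.isPrefixOf_iff_prefix.mpr (List.prefix_append pRUl _)⟩]
          rw [List.drop_left]
          rw [ih _ (by
            have hp : 0 < pRUl.length := by decide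
            simp only [List.length_drop] at hs ⊢
            omega) rus.tail uas]
          rw [List.append_assoc]
      · -- next replacement is the UA placeholder
        have hjne : (if uas ≠ [] then PySem.Chars.find s pUAl else -1) ≠ -1 :=
          fun hj0 => h2 ⟨fun hi0 => h1 ⟨hi0, hj0⟩, Or.inl hj0⟩
        have huane : uas ≠ [] := by
          intro hu
          exact hjne (by rw [if_neg (fun hh => hh hu)])
        have hfj : PySem.Chars.find s pUAl ≠ -1 := by
          rwa [if_pos huane] at hjne
        have hge0 : 0 ≤ PySem.Chars.find s pUAl := by
          have := PySem.Chars.neg_one_le_find s pUAl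
          omega
        obtain ⟨hdec, hmin, hxlen⟩ := find_decomp s pUAl (by decide) hfj
        have hOr : (if rus ≠ [] then PySem.Chars.find s pRUl else -1) = -1 ∨
            PySem.Chars.find s pUAl < (if rus ≠ [] then PySem.Chars.find s pRUl else -1) := by
          by_cases hi0 : (if rus ≠ [] then PySem.Chars.find s pRUl else -1) = -1
          · exact Or.inl hi0
          · right
            have hnlt : ¬ ((if uas ≠ [] then PySem.Chars.find s pUAl else -1) = -1 ∨
                (if rus ≠ [] then PySem.Chars.find s pRUl else -1) <
                  (if uas ≠ [] then PySem.Chars.find s pUAl else -1)) :=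
              fun hb => h2 ⟨hi0, hb⟩
            rw [if_pos huane] at hnlt
            have hrne : rus ≠ [] := by
              intro hr
              exact hi0 (by rw [if_neg (fun hh => hh hr)])
            rw [if_pos hrne] at hi0 ⊢
            have hgeI : 0 ≤ PySem.Chars.find s pRUl := by
              have := PySem.Chars.neg_one_le_find s pRUl
              omega
            have hne : PySem.Chars.find s pRUl ≠ PySem.Chars.find s pUAl := by
              intro heq
              obtain ⟨hatR, -⟩ := PySem.Chars.find_spec hgeI
              obtain ⟨hatU, -⟩ := PySem.Chars.find_spec hge0
              rw [heq] at hatR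
              exact both_at_same s (PySem.Chars.find s pUAl).toNat hatR hatU
            omega
        rw [pvScan2_branch3 s rus uas h1 h2, if_pos huane]
        conv_rhs => rw [hdec, List.append_assoc]
        rw [scan_append _ _ rus uas (fun k hk => by
          rw [hxlen] at hk
          have hdk : (s.take (PySem.Chars.find s pUAl).toNat).drop k ++
              (pUAl ++ s.drop ((PySem.Chars.find s pUAl).toNat + pUAl.length)) = s.drop k := by
            conv_rhs => rw [hdec]
            rw [List.append_assoc]
            exact (List.drop_append_of_le_length (by rw [hxlen]; omega)).symm
          constructor
          · rcases hOr with hi0 | hi0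
            · by_cases hr : rus = []
              · exact Or.inl hr
              · right
                rw [if_pos hr] at hi0
                rw [hdk]
                intro hpf
                exact (PySem.Chars.find_eq_neg_one_iff s pRUl).mp hi0 (infix_of_pfx_drop hpf)
            · right
              by_cases hr : rus = []
              · rw [if_neg (fun hh : rus ≠ [] => hh hr)] at hi0
                omega
              · rw [if_pos hr] at hi0
                have hi1 : 0 ≤ PySem.Chars.find s pRUl := by omega
                obtain ⟨-, hminRU⟩ := PySem.Chars.find_spec hi1
                rw [hdk]
                exact hminRU k (by omega)
          · right
            rw [hdk]
            exact hmin k hk)]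
        rcases hE : pUAl ++ s.drop ((PySem.Chars.find s pUAl).toNat + pUAl.length)
          with _ | ⟨c, rest⟩
        · exact absurd (List.append_eq_nil_iff.mp hE).1 (by decide)
        · rw [pvScan_cons, ← hE]
          rw [if_neg (fun hh =>
            not_pfx_of_mism mism_PQ _ (List.isPrefixOf_iff_prefix.mp hh.2))]
          rw [if_pos ⟨huane, List.isPrefixOf_iff_prefix.mpr (List.prefix_append pUAl _)⟩]
          rw [List.drop_left]
          rw [ih _ (by
            have hp : 0 < pUAl.length := by decide
            simp only [List.length_drop] at hs ⊢
            omega) rus uas.tail]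
          rw [List.append_assoc]

-- ===== VERDICT (by name: the statement is the Claim_ definition above) =====
theorem replace_description_placeholders_spec : Claim_equal_replace_description_placeholders := by
  intro xml_str offers_data _ hpre
  unfold Spec_replace_description_placeholders
  unfold replace_description_placeholders replace_description_placeholders_alt
  rw [main_lemma offers_data xml_str.toList hpre]
  congr 1
  exact (pvScan2_eq xml_str.toList.length xml_str.toList le_rfl _ _).symm
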